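-- pv_equiv track=rewrite | github.com/Ipshita29/100DaysOfCode | Day12/ques2.py | numOfFreq
-- ===== SOURCE A (Python) =====
-- def numOfFreq(arr, queries):
--     n = len(arr)
--     ps = [{} for _ in range(n + 1)]
--     for i in range(n):
--         ps[i + 1] = ps[i].copy()
--         if arr[i] in ps[i + 1]:
--             ps[i + 1][arr[i]] += 1
--         else:
--             ps[i + 1][arr[i]] = 1
--     result = []
--     for i, j, x in queries:
--         count_j = ps[j + 1].get(x, 0)
--         count_i = ps[i].get(x, 0)
--         result.append(count_j - count_i)
--
--     return result
-- ===== SOURCE B (Python) =====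
-- def numOfFreq(arr, queries):
--     n = len(arr)
--     pref = {}
--     for _, _, x in queries:
--         if x not in pref:
--             p = [0] * (n + 1)
--             c = 0
--             for k, v in enumerate(arr):
--                 if v == x:
--                     c += 1
--                 p[k + 1] = c
--             pref[x] = p
--     return [pref[x][j + 1] - pref[x][i] for i, j, x in queries]
-- ===== Notes on version B (the rewrite author's own statement) =====
-- stated objective: faster
-- what changed: Instead of materialising n+1 prefix-count dictionaries (a full dict copy per element), B builds, once per distinct queried value, a plain integer prefix-count array in a single pass over arr and answers each query by subtracting two entries of that array.
import Mathlib
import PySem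

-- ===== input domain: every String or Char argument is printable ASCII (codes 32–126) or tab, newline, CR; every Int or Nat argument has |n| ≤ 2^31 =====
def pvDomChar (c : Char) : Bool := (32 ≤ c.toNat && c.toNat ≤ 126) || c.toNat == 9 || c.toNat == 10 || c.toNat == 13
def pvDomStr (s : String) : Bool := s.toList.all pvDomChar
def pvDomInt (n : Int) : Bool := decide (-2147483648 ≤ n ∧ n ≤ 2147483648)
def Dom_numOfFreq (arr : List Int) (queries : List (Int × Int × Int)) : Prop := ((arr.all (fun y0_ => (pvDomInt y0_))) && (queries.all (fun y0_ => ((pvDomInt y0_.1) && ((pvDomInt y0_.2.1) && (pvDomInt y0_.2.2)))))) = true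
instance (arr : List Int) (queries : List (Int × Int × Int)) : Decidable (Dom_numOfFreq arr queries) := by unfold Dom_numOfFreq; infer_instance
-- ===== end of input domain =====

-- B replaces A's n+1 prefix-count dictionaries (a full dict copy per element) by one
-- plain integer prefix-count array per distinct queried value, built in a single pass
-- over arr; each query is then the difference of two array entries.

-- ===== PORT A =====
def numOfFreq (arr : List Int) (queries : List (Int × Int × Int)) : List Int :=
  let n := arr.length
  -- ps = [{} for _ in range(n + 1)]
  let ps0 : List (PySem.Dict Int Int) := (List.range (n + 1)).map (fun _ => PySem.Dict.empty)
  -- for i in range(n): ps[i+1] = ps[i].copy(); if arr[i] in ps[i+1]: +=1 else: =1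
  let ps := (List.range n).foldl (fun (ps : List (PySem.Dict Int Int)) (i : Nat) =>
      let prev := (PySem.List.pyGet? ps (i : Int)).getD PySem.Dict.empty
      let a := (PySem.List.pyGet? arr (i : Int)).getD 0
      let d' := if prev.contains a then prev.insert a (prev.getD a 0 + 1)
                else prev.insert a 1
      ps.set (i + 1) d') ps0
  -- result loop over queries; ps[j+1] / ps[i] raise IndexError outside Pre_ (the none
  -- branches, reachable only outside Pre_, return 0 for totality)
  queries.foldl (fun result q =>
      let cj := match PySem.List.pyGet? ps (q.2.1 + 1) with
                | some d => d.getD q.2.2 0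
                | none => 0
      let ci := match PySem.List.pyGet? ps q.1 with
                | some d => d.getD q.2.2 0
                | none => 0
      result ++ [cj - ci]) []

-- ===== PORT B =====
def numOfFreq_alt (arr : List Int) (queries : List (Int × Int × Int)) : List Int :=
  let n := arr.length
  -- pref = {}; for _, _, x in queries: if x not in pref: build prefix-count array for x
  let pref : PySem.Dict Int (List Int) :=
    queries.foldl (fun d q =>
      if d.contains q.2.2 then d
      else
        -- p = [0] * (n + 1); c = 0; for k, v in enumerate(arr): if v == x: c += 1; p[k+1] = c
        let pc := arr.zipIdx.foldl
          (fun (pc : List Int × Int) vk =>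
            let c := if vk.1 == q.2.2 then pc.2 + 1 else pc.2
            (pc.1.set (vk.2 + 1) c, c))
          (List.replicate (n + 1) 0, 0)
        d.insert q.2.2 pc.1) PySem.Dict.empty
  -- [pref[x][j+1] - pref[x][i] for i, j, x in queries]; p[j+1] / p[i] raise IndexError
  -- outside Pre_ (the getD 0 is reachable only outside Pre_, for totality)
  queries.map (fun q =>
    let p := pref.getD q.2.2 []
    (PySem.List.pyGet? p (q.2.1 + 1)).getD 0 - (PySem.List.pyGet? p q.1).getD 0)

-- ===== PRECONDITION & SPEC =====
-- Pre_ is exactly the returning domain of BOTH programs: each query's two bounds i and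
-- j+1 must be valid Python indices into a length-(n+1) prefix table (negative ones
-- included); outside Pre_ both A and B raise IndexError.
def Pre_numOfFreq (arr : List Int) (queries : List (Int × Int × Int)) : Prop :=
  ∀ q ∈ queries, -(arr.length + 1) ≤ q.1 ∧ q.1 ≤ arr.length
    ∧ -(arr.length + 1) ≤ q.2.1 + 1 ∧ q.2.1 + 1 ≤ arr.length
instance (arr : List Int) (queries : List (Int × Int × Int)) : Decidable (Pre_numOfFreq arr queries) := by unfold Pre_numOfFreq; infer_instance

def pvWitness_numOfFreq : List Int × (List (Int × Int × Int)) :=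
  ([1, 2, 1, 3], [(0, 3, 1), (1, 2, 2), (2, 1, 1), (-1, -2, 1)])

def Spec_numOfFreq (arr : List Int) (queries : List (Int × Int × Int)) (out : List Int) : Prop := out = numOfFreq_alt arr queries
instance (arr : List Int) (queries : List (Int × Int × Int)) (out : List Int) : Decidable (Spec_numOfFreq arr queries out) := by unfold Spec_numOfFreq; infer_instance

-- ===== CLAIM (what is proved, stated in full; the proofs are below) =====
def Claim_equal_numOfFreq : Prop := ∀ (arr : List Int) (queries : List (Int × Int × Int)), Dom_numOfFreq arr queries → Pre_numOfFreq arr queries → Spec_numOfFreq arr queries (numOfFreq arr queries)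

-- ===== LEMMAS AND PROOFS =====

-- the prefix-count dict of the first k elements, as A's loop builds it
def prefDict (arr : List Int) (k : Nat) : PySem.Dict Int Int :=
  (arr.take k).foldl (fun d x => d.insert x (d.getD x 0 + 1)) PySem.Dict.empty

-- the prefix-count array for value x, as B's inner loop builds it
def prefList (arr : List Int) (x : Int) : List Int :=
  (List.range (arr.length + 1)).map (fun k => ((arr.take k).count x : Int))

-- A's dict-update step is insert x (getD x 0 + 1) in both branches
lemma step_eq (d : PySem.Dict Int Int) (a : Int) :
    (if d.contains a then d.insert a (d.getD a 0 + 1) else d.insert a 1)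
      = d.insert a (d.getD a 0 + 1) := by
  by_cases h : d.contains a = true
  · simp [h]
  · simp only [Bool.not_eq_true] at h
    rw [h, PySem.Dict.getD_of_not_contains d 0 h]
    simp

-- the state of A's table-building loop after the first m iterations
lemma ps_loop (arr : List Int) (m : Nat) (hm : m ≤ arr.length) :
    (List.range m).foldl (fun (ps : List (PySem.Dict Int Int)) (i : Nat) =>
      let prev := (PySem.List.pyGet? ps (i : Int)).getD PySem.Dict.empty
      let a := (PySem.List.pyGet? arr (i : Int)).getD 0
      let d' := if prev.contains a then prev.insert a (prev.getD a 0 + 1)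
                else prev.insert a 1
      ps.set (i + 1) d')
      ((List.range (arr.length + 1)).map (fun _ => PySem.Dict.empty))
    = (List.range (m + 1)).map (prefDict arr)
      ++ List.replicate (arr.length - m) PySem.Dict.empty := by
  induction m with
  | zero =>
    simp [List.map_const', prefDict, List.replicate_succ]
  | succ m ih =>
    have hm' : m ≤ arr.length := by omega
    rw [show List.range (m+1) = List.range m ++ [m] from List.range_succ,
        List.foldl_append, ih hm', List.foldl_cons, List.foldl_nil]
    simp only
    have hlen1 : ((List.range (m + 1)).map (prefDict arr)).length = m + 1 := by simp
    have hprev : PySem.List.pyGet?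
        ((List.range (m + 1)).map (prefDict arr)
          ++ List.replicate (arr.length - m) PySem.Dict.empty) (m : Int)
        = some (prefDict arr m) := by
      rw [PySem.List.pyGet?_natCast]
      rw [List.getElem?_append_left (by omega)]
      simp
    have ha : PySem.List.pyGet? arr (m : Int) = some arr[m] := by
      rw [PySem.List.pyGet?_natCast, List.getElem?_eq_getElem (by omega)]
      rfl
    rw [hprev, ha]
    simp only [Option.getD_some]
    rw [step_eq]
    have hstep : (prefDict arr m).insert arr[m] ((prefDict arr m).getD arr[m] 0 + 1)
        = prefDict arr (m + 1) := by
      unfold prefDict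
      have htake : arr.take (m+1) = arr.take m ++ [arr[m]] := by
        rw [List.take_add_one, List.getElem?_eq_getElem (by omega)]
        rfl
      rw [htake, List.foldl_append, List.foldl_cons, List.foldl_nil]
    rw [hstep]
    rw [List.set_append_right (m+1) _ (by omega), hlen1, Nat.sub_self]
    have hrep : (List.replicate (arr.length - m) PySem.Dict.empty).set 0 (prefDict arr (m+1))
        = prefDict arr (m+1) :: List.replicate (arr.length - (m+1)) PySem.Dict.empty := by
      have : arr.length - m = (arr.length - (m+1)) + 1 := by omega
      rw [this, List.replicate_succ]
      simp
    rw [hrep, show List.range (m+1+1) = List.range (m+1) ++ [m+1] from List.range_succ]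
    simp

lemma prefDict_getD (arr : List Int) (k : Nat) (x : Int) :
    (prefDict arr k).getD x 0 = ((arr.take k).count x : Int) := by
  simp [prefDict, PySem.Dict.getD_foldl_insert_add_one, PySem.Dict.getD_empty]

-- indexing a length-(n+1) table of f-values with a valid Python index k
lemma pyGet?_map_range {α : Type} (f : Nat → α) (n : Nat) (k : Int)
    (h0 : -(n + 1) ≤ k) (hk : k ≤ n) :
    PySem.List.pyGet? ((List.range (n + 1)).map f) k
      = some (f (PySem.Int.mod k ((n : Int) + 1)).toNat) := by
  simp only [PySem.List.pyGet?, PySem.List.pyIdx?, List.length_map, List.length_range]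
  rw [PySem.Int.mod_eq_emod_of_pos (by omega)]
  by_cases hk0 : 0 ≤ k
  · have hemod : k % ((n : Int) + 1) = k := Int.emod_eq_of_lt hk0 (by omega)
    have hlt : k < ((n : Nat) + 1 : Int) := by omega
    have hltN : k.toNat < n + 1 := by omega
    simp [hk0, hlt, hltN, hemod]
  · have hemod : k % ((n : Int) + 1) = k + ((n : Int) + 1) := by
      have h1 : (k + ((n : Int) + 1)) % ((n : Int) + 1) = k % ((n : Int) + 1) := by
        have h2 := Int.add_mul_emod_self_left (a := k) (b := ((n : Int) + 1)) (c := 1)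
        rw [mul_one] at h2
        exact h2
      rw [← h1, Int.emod_eq_of_lt (by omega) (by omega)]
    have hge : -1 ≤ k + (n : Int) := by omega
    have hidx : n + 1 - (-k).toNat = (k + ((n : Int) + 1)).toNat := by omega
    have hltN : (k + ((n : Int) + 1)).toNat < n + 1 := by omega
    simp [hk0, hge, hemod, hidx, hltN]

-- the same dict pyGet? fact, specialised to A's finished table
lemma ps_get (arr : List Int) (k : Int) (h0 : -(arr.length + 1) ≤ k) (hk : k ≤ arr.length) :
    PySem.List.pyGet?
      ((List.range (arr.length + 1)).map (prefDict arr)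
        ++ List.replicate (arr.length - arr.length) PySem.Dict.empty) k
    = some (prefDict arr (PySem.Int.mod k ((arr.length : Int) + 1)).toNat) := by
  rw [Nat.sub_self, List.replicate_zero, List.append_nil]
  exact pyGet?_map_range (prefDict arr) arr.length k h0 hk

-- B's inner loop: the running state after consuming l, started with counter c and a
-- table p whose first s+1 entries are already final
lemma bfold (x : Int) (l : List Int) (s : Nat) (p : List Int) (c : Int)
    (hp : p.length = s + 1 + l.length) :
    (l.zipIdx s).foldl
      (fun (pc : List Int × Int) vk =>
        let c := if vk.1 == x then pc.2 + 1 else pc.2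
        (pc.1.set (vk.2 + 1) c, c)) (p, c)
    = (p.take (s + 1) ++ (List.range l.length).map
          (fun k => c + ((l.take (k + 1)).count x : Int)),
       c + (l.count x : Int)) := by
  induction l generalizing s p c with
  | nil =>
    simp only [List.length_nil, Nat.add_zero] at hp
    simp [List.take_of_length_le (Nat.le_of_eq hp)]
  | cons v t ih =>
    rw [List.zipIdx_cons, List.foldl_cons]
    simp only
    simp only [List.length_cons] at hp
    set c' : Int := if (v == x) = true then c + 1 else c with hc'
    have hl : (p.set (s + 1) c').length = (s + 1) + 1 + t.length := by
      simp only [List.length_set, hp, List.length_cons]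
      omega
    rw [ih (s + 1) (p.set (s + 1) c') c' hl]
    have hsp : s + 1 < p.length := by omega
    have htake : (p.set (s + 1) c').take (s + 1 + 1) = p.take (s + 1) ++ [c'] := by
      rw [List.take_set, List.take_add_one, List.getElem?_eq_getElem hsp]
      simp only [Option.toList_some]
      rw [List.set_append_right (s+1) _ (by simp [List.length_take])]
      simp [List.length_take, Nat.min_eq_left (le_of_lt hsp)]
    rw [htake]
    have hmap : (List.range (t.length + 1)).map
          (fun k => c + (((v :: t).take (k + 1)).count x : Int))
        = c' :: (List.range t.length).map
          (fun k => c' + ((t.take (k + 1)).count x : Int)) := by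
      rw [List.range_succ_eq_map, List.map_cons, List.map_map]
      congr 1
      · simp only [List.take_succ_cons, List.take_zero, List.count_cons, List.count_nil]
        by_cases hv : (v == x) = true <;> simp [hc', hv]
      · apply List.map_congr_left
        intro k _
        simp only [Function.comp, List.take_succ_cons, List.count_cons]
        by_cases hv : (v == x) = true <;> simp [hc', hv] <;> ring
    have hcnt : c + (((v :: t).count x : Nat) : Int) = c' + ((t.count x : Nat) : Int) := by
      rw [List.count_cons]
      by_cases hv : (v == x) = true <;> simp [hc', hv] <;> ring
    simp only [List.length_cons, hmap, hcnt, List.append_assoc, List.singleton_append]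

-- B's inner loop builds exactly the prefix-count array for x
lemma bfold_full (arr : List Int) (x : Int) :
    (arr.zipIdx.foldl
      (fun (pc : List Int × Int) vk =>
        let c := if vk.1 == x then pc.2 + 1 else pc.2
        (pc.1.set (vk.2 + 1) c, c))
      (List.replicate (arr.length + 1) 0, 0)).1 = prefList arr x := by
  rw [bfold x arr 0 _ 0 (by rw [List.length_replicate]; omega)]
  simp only [prefList]
  rw [List.range_succ_eq_map, List.map_cons, List.map_map]
  have h1 : (List.replicate (arr.length + 1) (0 : Int)).take 1 = [0] := by
    rw [List.replicate_succ]
    simp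
  rw [h1]
  simp [Function.comp]

-- 'x in pref' stays true through the rest of B's dict-building loop
lemma contains_fold_mono (arr : List Int) (qs : List (Int × Int × Int))
    (d : PySem.Dict Int (List Int)) (y : Int) (h : d.contains y = true) :
    (qs.foldl (fun d q =>
        if d.contains q.2.2 then d
        else
          let pc := arr.zipIdx.foldl
            (fun (pc : List Int × Int) vk =>
              let c := if vk.1 == q.2.2 then pc.2 + 1 else pc.2
              (pc.1.set (vk.2 + 1) c, c))
            (List.replicate (arr.length + 1) 0, 0)
          d.insert q.2.2 pc.1) d).contains y = true := by
  induction qs generalizing d with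
  | nil => exact h
  | cons r rs ih =>
    rw [List.foldl_cons]
    apply ih
    by_cases hc : d.contains r.2.2 = true
    · rw [if_pos hc]; exact h
    · rw [if_neg hc]
      simp only [PySem.Dict.contains_insert, h, Bool.or_true]

-- any key the dict-building loop has stored maps to its prefix-count array, and every
-- queried value gets stored
lemma pref_fold (arr : List Int) (qs : List (Int × Int × Int))
    (d : PySem.Dict Int (List Int))
    (hd : ∀ y, d.contains y = true → d.getD y [] = prefList arr y) :
    (∀ y, (qs.foldl (fun d q =>
        if d.contains q.2.2 then d
        else
          let pc := arr.zipIdx.foldl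
            (fun (pc : List Int × Int) vk =>
              let c := if vk.1 == q.2.2 then pc.2 + 1 else pc.2
              (pc.1.set (vk.2 + 1) c, c))
            (List.replicate (arr.length + 1) 0, 0)
          d.insert q.2.2 pc.1) d).contains y = true →
      (qs.foldl (fun d q =>
        if d.contains q.2.2 then d
        else
          let pc := arr.zipIdx.foldl
            (fun (pc : List Int × Int) vk =>
              let c := if vk.1 == q.2.2 then pc.2 + 1 else pc.2
              (pc.1.set (vk.2 + 1) c, c))
            (List.replicate (arr.length + 1) 0, 0)
          d.insert q.2.2 pc.1) d).getD y [] = prefList arr y)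
    ∧ ∀ q ∈ qs, (qs.foldl (fun d q =>
        if d.contains q.2.2 then d
        else
          let pc := arr.zipIdx.foldl
            (fun (pc : List Int × Int) vk =>
              let c := if vk.1 == q.2.2 then pc.2 + 1 else pc.2
              (pc.1.set (vk.2 + 1) c, c))
            (List.replicate (arr.length + 1) 0, 0)
          d.insert q.2.2 pc.1) d).contains q.2.2 = true := by
  induction qs generalizing d with
  | nil => exact ⟨hd, by simp⟩
  | cons q qs ih =>
    simp only [List.foldl_cons]
    set d1 := if d.contains q.2.2 = true then d
      else d.insert q.2.2 (arr.zipIdx.foldl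
        (fun (pc : List Int × Int) vk =>
          let c := if vk.1 == q.2.2 then pc.2 + 1 else pc.2
          (pc.1.set (vk.2 + 1) c, c))
        (List.replicate (arr.length + 1) 0, 0)).1 with hd1
    have hd1inv : ∀ y, d1.contains y = true → d1.getD y [] = prefList arr y := by
      intro y hy
      rw [hd1] at hy ⊢
      by_cases hc : d.contains q.2.2 = true
      · rw [if_pos hc] at hy ⊢
        exact hd y hy
      · rw [if_neg hc] at hy ⊢
        rw [PySem.Dict.getD_insert]
        by_cases hyq : y = q.2.2
        · rw [if_pos hyq, bfold_full, hyq]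
        · rw [if_neg hyq]
          rw [PySem.Dict.contains_insert] at hy
          exact hd y (by
            cases hor : (y == q.2.2) with
            | true => exact absurd (by simpa using hor) hyq
            | false => simpa [hor] using hy)
    have hd1q : d1.contains q.2.2 = true := by
      rw [hd1]
      by_cases hc : d.contains q.2.2 = true
      · rw [if_pos hc]; exact hc
      · rw [if_neg hc]; exact PySem.Dict.contains_insert_self _ _ _
    obtain ⟨hA, hB⟩ := ih d1 hd1inv
    refine ⟨hA, ?_⟩
    intro q' hq'
    rcases List.mem_cons.mp hq' with rfl | hq'
    · exact contains_fold_mono arr qs d1 _ hd1q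
    · exact hB q' hq'

-- ===== VERDICT (by name: the statement is the Claim_ definition above) =====
theorem numOfFreq_spec : Claim_equal_numOfFreq := by
  intro arr queries _hdom hpre
  unfold Spec_numOfFreq
  simp only [numOfFreq, numOfFreq_alt]
  rw [ps_loop arr arr.length (le_refl _)]
  rw [PySem.List.foldl_append_singleton_eq_map]
  simp only [List.nil_append]
  apply List.map_congr_left
  rintro ⟨i, j, x⟩ hq
  obtain ⟨hi0, hin, hj0, hjn⟩ := hpre _ hq
  simp only at hi0 hin hj0 hjn ⊢
  rw [ps_get arr (j + 1) hj0 hjn, ps_get arr i hi0 hin]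
  have hpref := (pref_fold arr queries PySem.Dict.empty (by simp)).2 _ hq
  have hgetD := (pref_fold arr queries PySem.Dict.empty (by simp)).1 x hpref
  simp only at hgetD
  rw [hgetD]
  simp only [prefList]
  rw [pyGet?_map_range _ arr.length (j + 1) hj0 hjn,
      pyGet?_map_range _ arr.length i hi0 hin]
  simp only [prefDict_getD, Option.getD_some]
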